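-- pv_equiv track=rewrite | github.com/Cwcw32/fundm_framework | dataprocess/BMRCs/pro_s1456_3yuanzu.py | fusion_dual_triplet
-- ===== SOURCE A (Python) =====
-- def fusion_dual_triplet(triplet):#
--     triplet_aspect = []
--     triplet_opinion = []
--     triplet_sentiment = []
--     dual_opinion = []
--     dual_aspect = []
--     for t in triplet:
--         if t[0] not in triplet_aspect: # 这个aspect之前没有
--             triplet_aspect.append(t[0]) # aspect放进去
--             triplet_opinion.append([t[1]]) # opinion放进去
--             triplet_sentiment.append(t[2]) # sent放进去
--         else:                          # 这个aspect之前有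
--             idx = triplet_aspect.index(t[0])#获得对应的索引
--             triplet_opinion[idx].append(t[1]) #对应的里面加 比如[[1],[3,4]]代表triplet_aspect（2个aspect） 那么[[9],[2]]是之前对应的opinion，现在新的triplet是([3,4],[7,8],[1]),那么就变成[[9],[[2],[7,8]]]
--             assert triplet_sentiment[idx] == t[2] # 同一个aspect就应该只有一个情感
--         if t[1] not in dual_opinion:    # 如果opinion之前没有
--             dual_opinion.append(t[1])
--             dual_aspect.append([t[0]])
--         else:                           # 有
--             idx = dual_opinion.index(t[1])
--             dual_aspect[idx].append(t[0])
--
--     # triplet_aspect: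
--     return triplet_aspect, triplet_opinion, triplet_sentiment, dual_opinion, dual_aspect
-- ===== SOURCE B (Python) =====
-- def fusion_dual_triplet(triplet):
--     # Staged gather: first dedupe the aspect / opinion key lists (first-occurrence
--     # order), then build each output list by a per-key filter pass over the whole
--     # input, asserting (like A) that all sentiments of one aspect agree.
--     def dedupe(xs):
--         seen = []
--         for x in xs:
--             if x not in seen:
--                 seen.append(x)
--         return seen
--
--     triplet_aspect = dedupe([t[0] for t in triplet])
--     triplet_opinion = [[t[1] for t in triplet if t[0] == a] for a in triplet_aspect]
--     triplet_sentiment = []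
--     for a in triplet_aspect:
--         sents = [t[2] for t in triplet if t[0] == a]
--         assert all(s == sents[0] for s in sents)  # one aspect, one sentiment
--         triplet_sentiment.append(sents[0])
--     dual_opinion = dedupe([t[1] for t in triplet])
--     dual_aspect = [[t[0] for t in triplet if t[1] == o] for o in dual_opinion]
--     return triplet_aspect, triplet_opinion, triplet_sentiment, dual_opinion, dual_aspect
-- ===== Notes on version B (the rewrite author's own statement) =====
-- stated objective: alternative
-- what changed: A builds the five parallel lists in one online pass, consulting and updating them with 'not in'/.index bookkeeping at every triplet; B is a staged gather: it first dedupes the aspect and opinion key lists in first-occurrence order, then constructs each output list by per-key filter passes over the whole input (asserting one sentiment per aspect like A).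
import Mathlib
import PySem

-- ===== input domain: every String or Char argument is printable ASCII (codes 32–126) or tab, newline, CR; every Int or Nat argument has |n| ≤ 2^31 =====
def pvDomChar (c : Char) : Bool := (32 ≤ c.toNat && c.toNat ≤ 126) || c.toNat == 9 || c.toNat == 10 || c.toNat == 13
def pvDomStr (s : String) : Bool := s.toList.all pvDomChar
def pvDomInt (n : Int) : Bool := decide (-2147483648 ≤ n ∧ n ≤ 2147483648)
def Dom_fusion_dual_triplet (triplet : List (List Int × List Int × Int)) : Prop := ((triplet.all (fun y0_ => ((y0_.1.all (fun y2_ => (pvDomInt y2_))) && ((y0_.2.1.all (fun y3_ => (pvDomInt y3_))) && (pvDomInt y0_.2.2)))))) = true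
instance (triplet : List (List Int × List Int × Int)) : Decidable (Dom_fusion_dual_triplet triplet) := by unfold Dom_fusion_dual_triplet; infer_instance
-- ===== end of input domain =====

-- B replaces A's online pass over five parallel lists by a staged gather: dedupe the
-- key lists first, then build each output list with per-key filter passes (alternative).


-- ===== PORT A =====
-- loop body of A; the 'assert triplet_sentiment[idx] == t[2]' raises exactly on the
-- inputs Pre_ excludes, so the port carries the rest of the body unchanged
def fdtStepA (st : List (List Int) × List (List (List Int)) × List Int × List (List Int) × List (List (List Int)))
    (t : List Int × List Int × Int) :
    List (List Int) × List (List (List Int)) × List Int × List (List Int) × List (List (List Int)) :=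
  let ta := st.1
  let topn := st.2.1
  let ts := st.2.2.1
  let dop := st.2.2.2.1
  let da := st.2.2.2.2
  let s1 : List (List Int) × List (List (List Int)) × List Int :=
    if t.1 ∉ ta then (ta ++ [t.1], topn ++ [[t.2.1]], ts ++ [t.2.2])
    else
      let idx := (PySem.List.index? ta t.1).getD 0
      (ta, topn.set idx (topn.getD idx [] ++ [t.2.1]), ts)
  let s2 : List (List Int) × List (List (List Int)) :=
    if t.2.1 ∉ dop then (dop ++ [t.2.1], da ++ [[t.1]])
    else
      let idx := (PySem.List.index? dop t.2.1).getD 0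
      (dop, da.set idx (da.getD idx [] ++ [t.1]))
  (s1.1, s1.2.1, s1.2.2, s2.1, s2.2)

def fusion_dual_triplet (triplet : List (List Int × List Int × Int)) : List (List Int) × List (List (List Int)) × List Int × List (List Int) × List (List (List Int)) :=
  triplet.foldl fdtStepA ([], [], [], [], [])

-- ===== PORT B =====
-- Source B's dedupe: keep the first occurrence of each key
def fdtDedupe (xs : List (List Int)) : List (List Int) :=
  xs.foldl (fun seen x => if x ∈ seen then seen else seen ++ [x]) []

-- sents[0] is ported as headD 0: the filtered list is nonempty for every a drawn from
-- triplet's aspects, so headD is exact there; the assert (which raises exactly on the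
-- inputs Pre_ excludes) is elided as in the port of A
def fusion_dual_triplet_alt (triplet : List (List Int × List Int × Int)) : List (List Int) × List (List (List Int)) × List Int × List (List Int) × List (List (List Int)) :=
  let ta := fdtDedupe (triplet.map (·.1))
  let topn := ta.map (fun a => (triplet.filter (fun t => t.1 == a)).map (·.2.1))
  let ts := ta.map (fun a => ((triplet.filter (fun t => t.1 == a)).map (·.2.2)).headD 0)
  let dop := fdtDedupe (triplet.map (·.2.1))
  let da := dop.map (fun o => (triplet.filter (fun t => t.2.1 == o)).map (·.1))
  (ta, topn, ts, dop, da)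

-- ===== PRECONDITION & SPEC =====
-- Pre_ excludes exactly the inputs on which both programs' assert fires: two triplets
-- with the same aspect but different sentiments (AssertionError).
def Pre_fusion_dual_triplet (triplet : List (List Int × List Int × Int)) : Prop :=
  ∀ p ∈ triplet, ∀ q ∈ triplet, p.1 = q.1 → p.2.2 = q.2.2
instance (triplet : List (List Int × List Int × Int)) : Decidable (Pre_fusion_dual_triplet triplet) := by unfold Pre_fusion_dual_triplet; infer_instance

def pvWitness_fusion_dual_triplet : (List (List Int × List Int × Int)) :=
  [([1], [2], 0), ([1], [3], 0), ([4], [2], 1)]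

def Spec_fusion_dual_triplet (triplet : List (List Int × List Int × Int)) (out : List (List Int) × List (List (List Int)) × List Int × List (List Int) × List (List (List Int))) : Prop := out = fusion_dual_triplet_alt triplet
instance (triplet : List (List Int × List Int × Int)) (out : List (List Int) × List (List (List Int)) × List Int × List (List Int) × List (List (List Int))) : Decidable (Spec_fusion_dual_triplet triplet out) := by unfold Spec_fusion_dual_triplet; infer_instance

-- ===== CLAIM (what is proved, stated in full; the proofs are below) =====
def Claim_equal_fusion_dual_triplet : Prop := ∀ (triplet : List (List Int × List Int × Int)), Dom_fusion_dual_triplet triplet → Pre_fusion_dual_triplet triplet → Spec_fusion_dual_triplet triplet (fusion_dual_triplet triplet)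

-- ===== LEMMAS AND PROOFS =====

theorem mem_fdtDedupe_aux (xs : List (List Int)) (acc : List (List Int)) (x : List Int) :
    x ∈ xs.foldl (fun seen y => if y ∈ seen then seen else seen ++ [y]) acc ↔ x ∈ acc ∨ x ∈ xs := by
  induction xs generalizing acc with
  | nil => simp
  | cons y ys ih =>
    simp only [List.foldl_cons]
    by_cases h : y ∈ acc
    · rw [if_pos h, ih]
      constructor
      · rintro (h1 | h1) <;> tauto
      · rintro (h1 | h1)
        · tauto
        · rcases List.mem_cons.mp h1 with rfl | h1 <;> tauto
    · rw [if_neg h, ih]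
      simp only [List.mem_append, List.mem_cons]
      tauto

theorem mem_fdtDedupe (xs : List (List Int)) (x : List Int) : x ∈ fdtDedupe xs ↔ x ∈ xs := by
  simp [fdtDedupe, mem_fdtDedupe_aux]

theorem nodup_fdtDedupe_aux (xs : List (List Int)) (acc : List (List Int)) (h : acc.Nodup) :
    (xs.foldl (fun seen y => if y ∈ seen then seen else seen ++ [y]) acc).Nodup := by
  induction xs generalizing acc with
  | nil => simpa
  | cons y ys ih =>
    simp only [List.foldl_cons]
    by_cases hy : y ∈ acc
    · simpa [hy] using ih acc h
    · refine ih _ ?_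
      simp only [hy, if_false]
      simp [List.nodup_append, h]
      exact fun a ha hcy => hy (hcy ▸ ha)

theorem nodup_fdtDedupe (xs : List (List Int)) : (fdtDedupe xs).Nodup :=
  nodup_fdtDedupe_aux xs [] (by simp)

theorem fdtDedupe_append_singleton (xs : List (List Int)) (x : List Int) :
    fdtDedupe (xs ++ [x]) = if x ∈ fdtDedupe xs then fdtDedupe xs else fdtDedupe xs ++ [x] := by
  simp [fdtDedupe, List.foldl_append]

-- replacing the function at only one position of a nodup key list equals a set
theorem map_set_of_nodup {A B : Type} [DecidableEq A] (K : List A) (f f' : A → B) (i : Nat)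
    (hi : i < K.length) (hnd : K.Nodup)
    (hoth : ∀ b ∈ K, b ≠ K[i] → f' b = f b) :
    K.map f' = (K.map f).set i (f' K[i]) := by
  apply List.ext_getElem
  · simp
  · intro j hj1 hj2
    simp only [List.length_map] at hj1
    rw [List.getElem_map, List.getElem_set]
    by_cases hij : i = j
    · subst hij; simp
    · rw [if_neg hij, List.getElem_map]
      refine hoth K[j] (List.getElem_mem _) (fun hEq => hij ?_)
      exact ((List.Nodup.getElem_inj_iff hnd).mp hEq).symm

theorem filter_aspect_append (l : List (List Int × List Int × Int)) (t : List Int × List Int × Int) (a : List Int) :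
    (l ++ [t]).filter (fun x => x.1 == a) =
      l.filter (fun x => x.1 == a) ++ (if t.1 = a then [t] else []) := by
  rw [List.filter_append]
  by_cases h : t.1 = a
  · simp [h]
  · simp [List.filter, beq_eq_false_iff_ne.mpr h, h]

theorem filter_opinion_append (l : List (List Int × List Int × Int)) (t : List Int × List Int × Int) (o : List Int) :
    (l ++ [t]).filter (fun x => x.2.1 == o) =
      l.filter (fun x => x.2.1 == o) ++ (if t.2.1 = o then [t] else []) := by
  rw [List.filter_append]
  by_cases h : t.2.1 = o
  · simp [h]
  · simp [List.filter, beq_eq_false_iff_ne.mpr h, h]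

theorem filter_aspect_nil (l : List (List Int × List Int × Int)) (a : List Int)
    (h : a ∉ l.map (fun x => x.1)) : l.filter (fun x => x.1 == a) = [] := by
  rw [List.filter_eq_nil_iff]
  intro x hx
  simp only [beq_iff_eq]
  exact fun he => h (List.mem_map.mpr ⟨x, hx, he⟩)

theorem filter_opinion_nil (l : List (List Int × List Int × Int)) (o : List Int)
    (h : o ∉ l.map (fun x => x.2.1)) : l.filter (fun x => x.2.1 == o) = [] := by
  rw [List.filter_eq_nil_iff]
  intro x hx
  simp only [beq_iff_eq]
  exact fun he => h (List.mem_map.mpr ⟨x, hx, he⟩)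

theorem filter_aspect_ne_nil (l : List (List Int × List Int × Int)) (a : List Int)
    (h : a ∈ l.map (fun x => x.1)) : l.filter (fun x => x.1 == a) ≠ [] := by
  obtain ⟨t, ht, hta⟩ := List.mem_map.mp h
  intro hnil
  have : t ∈ l.filter (fun x => x.1 == a) := List.mem_filter.mpr ⟨ht, by simp [hta]⟩
  rw [hnil] at this; exact absurd this (by simp)

theorem headD_append_of_ne_nil {A : Type} (m e : List A) (d : A) (h : m ≠ []) :
    (m ++ e).headD d = m.headD d := by
  cases m with
  | nil => exact absurd rfl h
  | cons x xs => rfl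

-- aspect side, key not seen before: all three aspect components gain one final entry
theorem aspect_new (l : List (List Int × List Int × Int)) (t : List Int × List Int × Int)
    (hm : t.1 ∉ fdtDedupe (l.map (fun x => x.1))) :
    fdtDedupe ((l ++ [t]).map (fun x => x.1)) = fdtDedupe (l.map (fun x => x.1)) ++ [t.1] ∧
    (fdtDedupe ((l ++ [t]).map (fun x => x.1))).map
        (fun a => ((l ++ [t]).filter (fun x => x.1 == a)).map (fun x => x.2.1)) =
      (fdtDedupe (l.map (fun x => x.1))).map
        (fun a => (l.filter (fun x => x.1 == a)).map (fun x => x.2.1)) ++ [[t.2.1]] ∧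
    (fdtDedupe ((l ++ [t]).map (fun x => x.1))).map
        (fun a => (((l ++ [t]).filter (fun x => x.1 == a)).map (fun x => x.2.2)).headD 0) =
      (fdtDedupe (l.map (fun x => x.1))).map
        (fun a => ((l.filter (fun x => x.1 == a)).map (fun x => x.2.2)).headD 0) ++ [t.2.2] := by
  have hK : fdtDedupe ((l ++ [t]).map (fun x => x.1)) = fdtDedupe (l.map (fun x => x.1)) ++ [t.1] := by
    rw [List.map_append, List.map_singleton, fdtDedupe_append_singleton, if_neg hm]
  have hnil : l.filter (fun x => x.1 == t.1) = [] :=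
    filter_aspect_nil l t.1 (fun h => hm ((mem_fdtDedupe _ _).mpr h))
  refine ⟨hK, ?_, ?_⟩
  · rw [hK, List.map_append, List.map_singleton]
    congr 1
    · apply List.map_congr_left
      intro a ha
      beta_reduce
      rw [filter_aspect_append, if_neg (fun h => hm (by rw [h]; exact ha)), List.append_nil]
    · beta_reduce
      rw [filter_aspect_append, if_pos rfl, hnil]
      simp
  · rw [hK, List.map_append, List.map_singleton]
    congr 1
    · apply List.map_congr_left
      intro a ha
      beta_reduce
      rw [filter_aspect_append, if_neg (fun h => hm (by rw [h]; exact ha)), List.append_nil]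
    · beta_reduce
      rw [filter_aspect_append, if_pos rfl, hnil]
      simp

-- aspect side, key seen before at index i: opinions updated in place, keys and sentiments unchanged
theorem aspect_old (l : List (List Int × List Int × Int)) (t : List Int × List Int × Int) (i : Nat)
    (hm : t.1 ∈ fdtDedupe (l.map (fun x => x.1)))
    (hi : PySem.List.index? (fdtDedupe (l.map (fun x => x.1))) t.1 = some i) :
    fdtDedupe ((l ++ [t]).map (fun x => x.1)) = fdtDedupe (l.map (fun x => x.1)) ∧
    (fdtDedupe ((l ++ [t]).map (fun x => x.1))).map
        (fun a => ((l ++ [t]).filter (fun x => x.1 == a)).map (fun x => x.2.1)) =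
      ((fdtDedupe (l.map (fun x => x.1))).map
        (fun a => (l.filter (fun x => x.1 == a)).map (fun x => x.2.1))).set i
        (((fdtDedupe (l.map (fun x => x.1))).map
          (fun a => (l.filter (fun x => x.1 == a)).map (fun x => x.2.1))).getD i [] ++ [t.2.1]) ∧
    (fdtDedupe ((l ++ [t]).map (fun x => x.1))).map
        (fun a => (((l ++ [t]).filter (fun x => x.1 == a)).map (fun x => x.2.2)).headD 0) =
      (fdtDedupe (l.map (fun x => x.1))).map
        (fun a => ((l.filter (fun x => x.1 == a)).map (fun x => x.2.2)).headD 0) := by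
  obtain ⟨hlt, hKi, -⟩ := PySem.List.getElem_of_index?_eq_some hi
  have hK : fdtDedupe ((l ++ [t]).map (fun x => x.1)) = fdtDedupe (l.map (fun x => x.1)) := by
    rw [List.map_append, List.map_singleton, fdtDedupe_append_singleton, if_pos hm]
  refine ⟨hK, ?_, ?_⟩
  · rw [hK]
    rw [map_set_of_nodup (fdtDedupe (l.map (fun x => x.1)))
        (fun a => (l.filter (fun x => x.1 == a)).map (fun x => x.2.1))
        (fun a => ((l ++ [t]).filter (fun x => x.1 == a)).map (fun x => x.2.1)) i hlt
        (nodup_fdtDedupe _)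
        (fun b _ hb => by
          beta_reduce
          rw [filter_aspect_append, if_neg (fun h => hb (by rw [← h, hKi])), List.append_nil])]
    congr 1
    beta_reduce
    rw [List.getD_eq_getElem _ [] (by simpa using hlt), List.getElem_map, hKi]
    rw [filter_aspect_append, if_pos rfl]
    simp
  · rw [hK]
    apply List.map_congr_left
    intro a ha
    beta_reduce
    rw [filter_aspect_append]
    by_cases hta : t.1 = a
    · rw [if_pos hta, List.map_append]
      refine headD_append_of_ne_nil _ _ _ ?_
      simp only [ne_eq, List.map_eq_nil_iff]
      exact filter_aspect_ne_nil l a ((mem_fdtDedupe _ _).mp ha)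
    · rw [if_neg hta, List.append_nil]

-- opinion side, key not seen before
theorem dual_new (l : List (List Int × List Int × Int)) (t : List Int × List Int × Int)
    (hm : t.2.1 ∉ fdtDedupe (l.map (fun x => x.2.1))) :
    fdtDedupe ((l ++ [t]).map (fun x => x.2.1)) = fdtDedupe (l.map (fun x => x.2.1)) ++ [t.2.1] ∧
    (fdtDedupe ((l ++ [t]).map (fun x => x.2.1))).map
        (fun o => ((l ++ [t]).filter (fun x => x.2.1 == o)).map (fun x => x.1)) =
      (fdtDedupe (l.map (fun x => x.2.1))).map
        (fun o => (l.filter (fun x => x.2.1 == o)).map (fun x => x.1)) ++ [[t.1]] := by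
  have hK : fdtDedupe ((l ++ [t]).map (fun x => x.2.1)) = fdtDedupe (l.map (fun x => x.2.1)) ++ [t.2.1] := by
    rw [List.map_append, List.map_singleton, fdtDedupe_append_singleton, if_neg hm]
  have hnil : l.filter (fun x => x.2.1 == t.2.1) = [] :=
    filter_opinion_nil l t.2.1 (fun h => hm ((mem_fdtDedupe _ _).mpr h))
  refine ⟨hK, ?_⟩
  rw [hK, List.map_append, List.map_singleton]
  congr 1
  · apply List.map_congr_left
    intro o ho
    beta_reduce
    rw [filter_opinion_append, if_neg (fun h => hm (by rw [h]; exact ho)), List.append_nil]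
  · beta_reduce
    rw [filter_opinion_append, if_pos rfl, hnil]
    simp

-- opinion side, key seen before at index i
theorem dual_old (l : List (List Int × List Int × Int)) (t : List Int × List Int × Int) (i : Nat)
    (hm : t.2.1 ∈ fdtDedupe (l.map (fun x => x.2.1)))
    (hi : PySem.List.index? (fdtDedupe (l.map (fun x => x.2.1))) t.2.1 = some i) :
    fdtDedupe ((l ++ [t]).map (fun x => x.2.1)) = fdtDedupe (l.map (fun x => x.2.1)) ∧
    (fdtDedupe ((l ++ [t]).map (fun x => x.2.1))).map
        (fun o => ((l ++ [t]).filter (fun x => x.2.1 == o)).map (fun x => x.1)) =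
      ((fdtDedupe (l.map (fun x => x.2.1))).map
        (fun o => (l.filter (fun x => x.2.1 == o)).map (fun x => x.1))).set i
        (((fdtDedupe (l.map (fun x => x.2.1))).map
          (fun o => (l.filter (fun x => x.2.1 == o)).map (fun x => x.1))).getD i [] ++ [t.1]) := by
  obtain ⟨hlt, hKi, -⟩ := PySem.List.getElem_of_index?_eq_some hi
  have hK : fdtDedupe ((l ++ [t]).map (fun x => x.2.1)) = fdtDedupe (l.map (fun x => x.2.1)) := by
    rw [List.map_append, List.map_singleton, fdtDedupe_append_singleton, if_pos hm]
  refine ⟨hK, ?_⟩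
  rw [hK]
  rw [map_set_of_nodup (fdtDedupe (l.map (fun x => x.2.1)))
      (fun o => (l.filter (fun x => x.2.1 == o)).map (fun x => x.1))
      (fun o => ((l ++ [t]).filter (fun x => x.2.1 == o)).map (fun x => x.1)) i hlt
      (nodup_fdtDedupe _)
      (fun b _ hb => by
        beta_reduce
        rw [filter_opinion_append, if_neg (fun h => hb (by rw [← h, hKi])), List.append_nil])]
  congr 1
  beta_reduce
  rw [List.getD_eq_getElem _ [] (by simpa using hlt), List.getElem_map, hKi]
  rw [filter_opinion_append, if_pos rfl]
  simp

-- the step of A, applied to B's staged-gather value on l, yields B's value on l ++ [t]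
theorem fdt_step (l : List (List Int × List Int × Int)) (t : List Int × List Int × Int) :
    fdtStepA (fusion_dual_triplet_alt l) t = fusion_dual_triplet_alt (l ++ [t]) := by
  simp only [fusion_dual_triplet_alt, fdtStepA]
  by_cases hma : t.1 ∈ fdtDedupe (l.map (fun x => x.1)) <;>
    by_cases hmo : t.2.1 ∈ fdtDedupe (l.map (fun x => x.2.1))
  · obtain ⟨ia, hia⟩ := Option.isSome_iff_exists.mp ((PySem.List.index?_isSome_iff _ _).mpr hma)
    obtain ⟨io, hio⟩ := Option.isSome_iff_exists.mp ((PySem.List.index?_isSome_iff _ _).mpr hmo)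
    obtain ⟨a1, a2, a3⟩ := aspect_old l t ia hma hia
    obtain ⟨d1, d2⟩ := dual_old l t io hmo hio
    rw [if_neg (not_not_intro hma), if_neg (not_not_intro hmo), hia, hio, a2, a3, d2, a1, d1]
    simp
  · obtain ⟨ia, hia⟩ := Option.isSome_iff_exists.mp ((PySem.List.index?_isSome_iff _ _).mpr hma)
    obtain ⟨a1, a2, a3⟩ := aspect_old l t ia hma hia
    obtain ⟨d1, d2⟩ := dual_new l t hmo
    rw [if_neg (not_not_intro hma), if_pos hmo, hia, a2, a3, d2, a1, d1]
    simp
  · obtain ⟨io, hio⟩ := Option.isSome_iff_exists.mp ((PySem.List.index?_isSome_iff _ _).mpr hmo)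
    obtain ⟨a1, a2, a3⟩ := aspect_new l t hma
    obtain ⟨d1, d2⟩ := dual_old l t io hmo hio
    rw [if_pos hma, if_neg (not_not_intro hmo), hio, a2, a3, d2, a1, d1]
    simp
  · obtain ⟨a1, a2, a3⟩ := aspect_new l t hma
    obtain ⟨d1, d2⟩ := dual_new l t hmo
    rw [if_pos hma, if_pos hmo, a2, a3, d2, a1, d1]

theorem fdt_main (l : List (List Int × List Int × Int)) :
    fusion_dual_triplet l = fusion_dual_triplet_alt l := by
  induction l using List.reverseRecOn with
  | nil => rfl
  | append_singleton l t ih =>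
    rw [fusion_dual_triplet, List.foldl_append, List.foldl_cons, List.foldl_nil,
      ← fusion_dual_triplet, ih]
    exact fdt_step l t

-- ===== VERDICT (by name: the statement is the Claim_ definition above) =====
theorem fusion_dual_triplet_spec : Claim_equal_fusion_dual_triplet := by
  intro triplet _ _
  exact fdt_main triplet
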